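-- pv_equiv track=rewrite | github.com/lat08/healthguard-model-api | app/services/prediction_contract.py | _canonical_feature_name
-- ===== SOURCE A (Python) =====
-- from typing import Any, Mapping, Sequence
--
-- def _canonical_feature_name(feature_name: str, feature_values: Mapping[str, Any]) -> str:
--     candidate = feature_name.split("__", 1)[1] if "__" in feature_name else feature_name
--     if candidate in feature_values:
--         return candidate
--     matches = [key for key in feature_values if candidate.startswith(f"{key}_")]
--     if matches:
--         return max(matches, key=len)
--     return candidate
-- ===== SOURCE B (Python) =====
-- def _canonical_feature_name(feature_name: str, feature_values) -> str:
--     candidate = feature_name.split("__", 1)[1] if "__" in feature_name else feature_name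
--     if candidate in feature_values:
--         return candidate
--     for i in range(len(candidate) - 1, -1, -1):
--         if candidate[i] == "_" and candidate[:i] in feature_values:
--             return candidate[:i]
--     return candidate
-- ===== Notes on version B (the rewrite author's own statement) =====
-- stated objective: alternative
-- what changed: Instead of filtering every key of the mapping with startswith and taking the longest match, B walks the candidate's '_' positions from right to left and returns the first prefix that is a key of the mapping.
import Mathlib
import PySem

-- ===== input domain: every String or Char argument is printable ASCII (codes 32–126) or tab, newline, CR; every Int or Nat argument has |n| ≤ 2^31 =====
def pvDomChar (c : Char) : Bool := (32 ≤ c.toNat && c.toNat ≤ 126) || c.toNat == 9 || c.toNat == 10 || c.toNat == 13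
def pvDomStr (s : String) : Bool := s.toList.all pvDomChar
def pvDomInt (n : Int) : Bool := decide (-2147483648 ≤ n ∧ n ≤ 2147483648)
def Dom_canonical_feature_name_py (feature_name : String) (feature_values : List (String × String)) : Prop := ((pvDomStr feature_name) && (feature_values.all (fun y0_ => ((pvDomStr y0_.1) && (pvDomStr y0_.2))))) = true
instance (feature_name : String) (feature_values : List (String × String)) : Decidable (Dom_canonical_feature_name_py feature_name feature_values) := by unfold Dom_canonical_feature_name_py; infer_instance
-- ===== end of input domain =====

-- B replaces A's scan of every key (startswith filter + max-by-len) by testing the candidate's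
-- own '_' cut points from right to left with a key lookup per cut point; objective: alternative.

-- shared helpers: both Pythons compute `candidate` by the same line, and both test
-- `x in feature_values` (key membership of the mapping, here an association list)
def pvHasKey (feature_values : List (String × String)) (k : String) : Bool :=
  feature_values.any (fun p => p.1 == k)

def pvCandidate (feature_name : String) : String :=
  if PySem.Str.isIn "__" feature_name then
    -- feature_name.split("__", 1)[1]; since "__" occurs in feature_name the split has two
    -- pieces, so the fallback branches are unreachable
    match PySem.Str.splitMax? feature_name "__" 1 with
    | some (_ :: c :: _) => c
    | _ => feature_name
  else feature_name

-- ===== PORT A =====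
def canonical_feature_name_py (feature_name : String) (feature_values : List (String × String)) : String :=
  let candidate := pvCandidate feature_name
  if pvHasKey feature_values candidate then candidate
  else
    let ms := (feature_values.map Prod.fst).filter
      (fun key => PySem.Str.startswith candidate (key ++ "_"))
    match PySem.List.max? ms PySem.Str.len with
    | some m => m
    | none => candidate

-- ===== PORT B =====
-- the loop `for i in range(len(candidate)-1, -1, -1)` as countdown recursion on i+1;
-- candidate[i] and candidate[:i] are ported by hand on the char list (exact: 0 ≤ i < len)
def pvScan (cs : List Char) (feature_values : List (String × String)) : Nat → Option String
  | 0 => none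
  | i + 1 =>
    if cs[i]? == some '_' && pvHasKey feature_values (String.ofList (cs.take i)) then
      some (String.ofList (cs.take i))
    else pvScan cs feature_values i

def canonical_feature_name_py_alt (feature_name : String) (feature_values : List (String × String)) : String :=
  let candidate := pvCandidate feature_name
  if pvHasKey feature_values candidate then candidate
  else
    match pvScan candidate.toList feature_values candidate.toList.length with
    | some r => r
    | none => candidate

-- ===== PRECONDITION & SPEC =====
def Spec_canonical_feature_name_py (feature_name : String) (feature_values : List (String × String)) (out : String) : Prop := out = canonical_feature_name_py_alt feature_name feature_values
instance (feature_name : String) (feature_values : List (String × String)) (out : String) : Decidable (Spec_canonical_feature_name_py feature_name feature_values out) := by unfold Spec_canonical_feature_name_py; infer_instance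

-- ===== CLAIM (what is proved, stated in full; the proofs are below) =====
def Claim_equal_canonical_feature_name_py : Prop := ∀ (feature_name : String) (feature_values : List (String × String)), Dom_canonical_feature_name_py feature_name feature_values → Spec_canonical_feature_name_py feature_name feature_values (canonical_feature_name_py feature_name feature_values)

-- ===== LEMMAS AND PROOFS =====

-- "position j of cs is a valid cut point": cs[j] = '_' and cs[:j] is a key
def pvCut (cs : List Char) (fv : List (String × String)) (j : Nat) : Prop :=
  cs[j]? = some '_' ∧ pvHasKey fv (String.ofList (cs.take j)) = true

lemma pvCut_lt {cs : List Char} {fv : List (String × String)} {j : Nat}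
    (h : pvCut cs fv j) : j < cs.length := by
  have h1 := h.1
  by_contra hlt
  rw [List.getElem?_eq_none (by omega : cs.length ≤ j)] at h1
  exact absurd h1 (by simp)

lemma pvScan_none_iff (cs : List Char) (fv : List (String × String)) (i : Nat) :
    pvScan cs fv i = none ↔ ∀ j < i, ¬ pvCut cs fv j := by
  induction i with
  | zero => simp [pvScan]
  | succ i ih =>
    simp only [pvScan]
    by_cases hc : (cs[i]? == some '_' && pvHasKey fv (String.ofList (cs.take i))) = true
    · rw [if_pos hc]
      constructor
      · intro h; exact absurd h (by simp)
      · intro h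
        exact absurd (by simpa [pvCut, Bool.and_eq_true, beq_iff_eq] using hc)
          (h i (Nat.lt_succ_self i))
    · rw [if_neg hc, ih]
      constructor
      · intro h j hj hcut
        rcases Nat.lt_succ_iff_lt_or_eq.mp hj with hj' | rfl
        · exact h j hj' hcut
        · exact hc (by simpa [pvCut, Bool.and_eq_true, beq_iff_eq] using hcut)
      · intro h j hj hcut
        exact h j (Nat.lt_succ_of_lt hj) hcut

lemma pvScan_some {cs : List Char} {fv : List (String × String)} {i : Nat} {r : String}
    (h : pvScan cs fv i = some r) :
    ∃ j, j < i ∧ pvCut cs fv j ∧ r = String.ofList (cs.take j) ∧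
      ∀ j' < i, pvCut cs fv j' → j' ≤ j := by
  induction i with
  | zero => simp [pvScan] at h
  | succ i ih =>
    simp only [pvScan] at h
    by_cases hc : (cs[i]? == some '_' && pvHasKey fv (String.ofList (cs.take i))) = true
    · rw [if_pos hc] at h
      refine ⟨i, Nat.lt_succ_self i,
        by simpa [pvCut, Bool.and_eq_true, beq_iff_eq] using hc,
        (Option.some_inj.mp h).symm, fun j' hj' _ => Nat.lt_succ_iff.mp hj'⟩
    · rw [if_neg hc] at h
      obtain ⟨j, hj, hcut, hr, hmax⟩ := ih h
      refine ⟨j, Nat.lt_succ_of_lt hj, hcut, hr, fun j' hj' hcut' => ?_⟩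
      rcases Nat.lt_succ_iff_lt_or_eq.mp hj' with hj'' | rfl
      · exact hmax j' hj'' hcut'
      · exact absurd (by simpa [pvCut, Bool.and_eq_true, beq_iff_eq] using hcut') hc

lemma pvHasKey_iff (fv : List (String × String)) (k : String) :
    pvHasKey fv k = true ↔ k ∈ fv.map Prod.fst := by
  simp only [pvHasKey, List.any_eq_true, beq_iff_eq, List.mem_map]

-- prefix "l followed by an underscore" decomposed at the cut point
lemma pvPrefix_underscore_iff (l cs : List Char) :
    (l ++ ['_']) <+: cs ↔ cs.take l.length = l ∧ cs[l.length]? = some '_' := by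
  constructor
  · rintro ⟨t, ht⟩
    rw [← ht, List.append_assoc]
    constructor
    · exact List.take_left
    · rw [List.getElem?_append_right (Nat.le_refl _)]
      simp
  · rintro ⟨h1, h2⟩
    have hlt : l.length < cs.length := by
      by_contra hlt
      rw [List.getElem?_eq_none (by omega : cs.length ≤ l.length)] at h2
      exact absurd h2 (by simp)
    refine ⟨cs.drop (l.length + 1), ?_⟩
    have hd := List.drop_eq_getElem_cons (l := cs) (i := l.length) hlt
    have hch : cs[l.length] = '_' := by
      rw [List.getElem?_eq_getElem hlt, Option.some_inj] at h2; exact h2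
    calc l ++ ['_'] ++ cs.drop (l.length + 1)
        = cs.take l.length ++ cs.drop l.length := by
          rw [h1, hd, hch]; simp
      _ = cs := List.take_append_drop _ _

-- membership in A's match list, decomposed at the cut point
lemma pvMatches_iff (c : String) (fv : List (String × String)) (k : String) :
    (k ∈ (fv.map Prod.fst).filter
        (fun key => PySem.Str.startswith c (key ++ "_"))) ↔
      (pvCut c.toList fv k.toList.length ∧
        k = String.ofList (c.toList.take k.toList.length)) := by
  have hu : ("_" : String).toList = ['_'] := rfl
  rw [List.mem_filter, PySem.Str.startswith_eq, PySem.Chars.startswith_iff,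
    String.toList_append, hu, pvPrefix_underscore_iff, ← pvHasKey_iff]
  constructor
  · rintro ⟨hmem, htake, hget⟩
    have hofl : String.ofList (c.toList.take k.toList.length) = k := by
      rw [htake]; exact String.ofList_toList
    exact ⟨⟨hget, by rw [hofl]; exact hmem⟩, hofl.symm⟩
  · rintro ⟨⟨hget, hkey⟩, hk⟩
    have htake : c.toList.take k.toList.length = k.toList := by
      conv_rhs => rw [hk, String.toList_ofList]
    have hofl : String.ofList (c.toList.take k.toList.length) = k := by
      rw [htake]; exact String.ofList_toList
    exact ⟨by rw [← hofl]; exact hkey, htake, hget⟩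

-- a cut point yields a match whose length is that cut point
lemma pvCut_gives_match {c : String} {fv : List (String × String)} {j : Nat}
    (h : pvCut c.toList fv j) :
    String.ofList (c.toList.take j) ∈ (fv.map Prod.fst).filter
        (fun key => PySem.Str.startswith c (key ++ "_")) ∧
      (String.ofList (c.toList.take j)).toList.length = j := by
  have hj := pvCut_lt h
  have hlen : (String.ofList (c.toList.take j)).toList.length = j := by
    rw [String.toList_ofList, List.length_take]; omega
  refine ⟨(pvMatches_iff c fv _).mpr ?_, hlen⟩
  rw [hlen]
  exact ⟨h, rfl⟩

-- ===== VERDICT (by name: the statement is the Claim_ definition above) =====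
theorem canonical_feature_name_py_spec : Claim_equal_canonical_feature_name_py := by
  intro fn fv _
  unfold Spec_canonical_feature_name_py canonical_feature_name_py canonical_feature_name_py_alt
  set c := pvCandidate fn with hc
  by_cases hk : pvHasKey fv c = true
  · simp only [hk, if_pos]
  · simp only [Bool.not_eq_true] at hk
    simp only [hk, Bool.false_eq_true, if_neg, not_false_iff]
    cases hmax : PySem.List.max? ((fv.map Prod.fst).filter
        (fun key => PySem.Str.startswith c (key ++ "_"))) PySem.Str.len with
    | none =>
      have hempty := (PySem.List.max?_eq_none_iff _ _).mp hmax
      have hscan : pvScan c.toList fv c.toList.length = none := by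
        rw [pvScan_none_iff]
        intro j _ hcut
        have hmem := (pvCut_gives_match hcut).1
        rw [hempty] at hmem
        exact List.not_mem_nil hmem
      simp only [hscan]
    | some m =>
      have hmem := PySem.List.max?_mem hmax
      have hcutm := (pvMatches_iff c fv m).mp hmem
      have hmlt : m.toList.length < c.toList.length := pvCut_lt hcutm.1
      cases hscan : pvScan c.toList fv c.toList.length with
      | none =>
        exact absurd hcutm.1 ((pvScan_none_iff _ _ _).mp hscan m.toList.length hmlt)
      | some r =>
        obtain ⟨j, hj, hcut, hr, hmaxj⟩ := pvScan_some hscan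
        have h1 : m.toList.length ≤ j := hmaxj _ hmlt hcutm.1
        have h2 : j ≤ m.toList.length := by
          obtain ⟨hmem2, hlen2⟩ := pvCut_gives_match hcut
          have hle := PySem.List.max?_isMax hmax _ hmem2
          rw [PySem.Str.len_eq, PySem.Str.len_eq, hlen2] at hle
          exact_mod_cast hle
        have hje : j = m.toList.length := le_antisymm h2 h1
        rw [hr, hje, ← hcutm.2]
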